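-- pv_equiv track=rewrite | github.com/frink-okn/frink-embeddings | src/main.py | prettify_from_iri
-- ===== SOURCE A (Python) =====
-- def iri_tail(iri: str) -> str:
--     """Return a readable tail from an IRI/URI for fallback labeling."""
--     if not iri:
--         return ""
--     tail = iri.rsplit("/", 1)[-1]
--     tail = tail.rsplit("#", 1)[-1]
--     return tail
--
-- def prettify_from_iri(iri: str) -> str:
--     """
--     Derive a human-ish label from an IRI tail.
--     Example: 'StainlessSteelProcessingCapability' -> 'Stainless Steel Processing Capability'
--              'HP_0004321' -> 'HP 0004321'
--     """
--     tail = iri_tail(iri)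
--     if not tail:
--         return iri or ""
--
--     out = []
--     token = ""
--     for ch in tail:
--         if ch in {"_", "-"}:
--             if token:
--                 out.append(token)
--                 token = ""
--         elif ch.isupper() and token and not token[-1].isupper():
--             out.append(token)
--             token = ch
--         else:
--             token += ch
--     if token:
--         out.append(token)
--
--     label = " ".join(out).strip()
--     return label or iri
-- ===== SOURCE B (Python) =====
-- def prettify_from_iri(iri: str) -> str:
--     """Single streaming pass: emit characters, inserting a space at each word
--     boundary detected from the previous character (no token accumulator)."""
--     if not iri:
--         return ""
--     tail = iri.rsplit("/", 1)[-1].rsplit("#", 1)[-1]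
--     if not tail:
--         return iri
--     s = ""
--     prev = None
--     for ch in tail:
--         if ch in "_-":
--             if prev is not None and prev not in "_-":
--                 s += " "
--         else:
--             if ch.isupper() and prev is not None and prev not in "_-" and not prev.isupper():
--                 s += " "
--             s += ch
--         prev = ch
--     label = s.strip()
--     return label or iri
-- ===== Notes on version B (the rewrite author's own statement) =====
-- stated objective: simpler
-- what changed: Replaces A's token-accumulator state machine (build a token, flush it into a list, join the list with spaces) by a single streaming pass that emits each character directly and inserts a space at a boundary decided from the previous character alone.
import Mathlib
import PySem

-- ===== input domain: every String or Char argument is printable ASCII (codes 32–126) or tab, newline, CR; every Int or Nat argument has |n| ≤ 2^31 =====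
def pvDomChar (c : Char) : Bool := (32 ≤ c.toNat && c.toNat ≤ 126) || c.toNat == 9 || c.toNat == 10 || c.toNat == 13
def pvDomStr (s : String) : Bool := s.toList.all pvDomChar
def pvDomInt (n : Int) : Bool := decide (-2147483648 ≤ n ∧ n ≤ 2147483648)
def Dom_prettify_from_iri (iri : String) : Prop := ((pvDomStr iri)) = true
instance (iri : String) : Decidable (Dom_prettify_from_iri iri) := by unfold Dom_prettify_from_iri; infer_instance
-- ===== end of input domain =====

-- B replaces A's token-accumulator state machine by a single streaming pass that
-- emits characters directly, deciding each space from the previous character only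
-- (objective: simpler; same cost).

-- ===== PORT A =====

-- ch in {"_", "-"}
def pvIsSep (c : Char) : Bool := c == '_' || c == '-'

-- iri.rsplit(sep, 1)[-1] for a one-char sep: exactly the suffix after the LAST
-- occurrence of the char (the whole string if absent) — ported by hand as
-- reverse/takeWhile/reverse, which is exact for this rsplit form.
def pvTailA (s : List Char) : List Char :=
  if s = [] then []
  else
    let t1 := (s.reverse.takeWhile (fun c => c != '/')).reverse
    (t1.reverse.takeWhile (fun c => c != '#')).reverse

-- one iteration of A's for-loop; state = (out, token)
def pvStepA (st : List (List Char) × List Char) (ch : Char) : List (List Char) × List Char :=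
  if pvIsSep ch then
    if st.2 ≠ [] then (st.1 ++ [st.2], []) else st
  else if PySem.Chars.isupper ch ∧ st.2 ≠ [] ∧ ¬ PySem.Chars.isupper (st.2.getLastD ' ') then
    (st.1 ++ [st.2], [ch])
  else (st.1, st.2 ++ [ch])

def prettify_from_iri (iri : String) : String :=
  let tail := pvTailA iri.toList
  if tail = [] then (if iri.toList = [] then "" else iri)
  else
    let st := tail.foldl pvStepA ([], [])
    let out := if st.2 ≠ [] then st.1 ++ [st.2] else st.1
    let label := PySem.Chars.strip (PySem.Chars.join [' '] out)
    if label ≠ [] then String.ofList label else iri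

-- ===== PORT B =====

-- prev is not None and prev not in "_-"
def pvPrevOk (p : Option Char) : Bool :=
  match p with
  | some c => !pvIsSep c
  | none => false

-- ch.isupper() and prev is not None and prev not in "_-" and not prev.isupper()
def pvBoundary (p : Option Char) (ch : Char) : Bool :=
  match p with
  | some c => PySem.Chars.isupper ch && !pvIsSep c && !PySem.Chars.isupper c
  | none => false

-- one iteration of B's for-loop; state = (s, prev)
def pvStepB (st : List Char × Option Char) (ch : Char) : List Char × Option Char :=
  if pvIsSep ch then
    ((if pvPrevOk st.2 then st.1 ++ [' '] else st.1), some ch)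
  else
    ((if pvBoundary st.2 ch then st.1 ++ [' ', ch] else st.1 ++ [ch]), some ch)

-- same tail expression as Source B (iri.rsplit("/",1)[-1].rsplit("#",1)[-1], hand-ported as above)
def pvTailB (s : List Char) : List Char :=
  if s = [] then []
  else
    let t1 := (s.reverse.takeWhile (fun c => c != '/')).reverse
    (t1.reverse.takeWhile (fun c => c != '#')).reverse

def prettify_from_iri_alt (iri : String) : String :=
  if iri.toList = [] then ""
  else
    let tail := pvTailB iri.toList
    if tail = [] then iri
    else
      let st := tail.foldl pvStepB ([], none)
      let label := PySem.Chars.strip st.1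
      if label ≠ [] then String.ofList label else iri

-- ===== PRECONDITION & SPEC =====
def Spec_prettify_from_iri (iri : String) (out : String) : Prop := out = prettify_from_iri_alt iri
instance (iri : String) (out : String) : Decidable (Spec_prettify_from_iri iri out) := by unfold Spec_prettify_from_iri; infer_instance

-- ===== CLAIM (what is proved, stated in full; the proofs are below) =====
def Claim_equal_prettify_from_iri : Prop := ∀ (iri : String), Dom_prettify_from_iri iri → Spec_prettify_from_iri iri (prettify_from_iri iri)

-- ===== LEMMAS AND PROOFS =====

-- relation between A's loop state (out, token) and B's loop state (s, prev)
def pvInv (a : List (List Char) × List Char) (b : List Char × Option Char) : Prop :=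
  (a.2 = [] →
    pvPrevOk b.2 = false ∧
    ((a.1 = [] ∧ b.1 = []) ∨ (a.1 ≠ [] ∧ b.1 = PySem.Chars.join [' '] a.1 ++ [' '])))
  ∧ (a.2 ≠ [] →
    b.1 = PySem.Chars.join [' '] (a.1 ++ [a.2]) ∧
    b.2 = some (a.2.getLastD ' ') ∧
    pvIsSep (a.2.getLastD ' ') = false)

theorem pv_join_append (xs : List (List Char)) (y : List Char) (h : xs ≠ []) :
    PySem.Chars.join [' '] (xs ++ [y]) = PySem.Chars.join [' '] xs ++ ' ' :: y := by
  induction xs with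
  | nil => exact absurd rfl h
  | cons a t ih =>
    cases t with
    | nil => simp [PySem.Chars.join_cons_cons, PySem.Chars.join_singleton]
    | cons b' t' =>
      have hih := ih (by simp)
      simp only [List.cons_append] at hih ⊢
      rw [PySem.Chars.join_cons_cons, hih, PySem.Chars.join_cons_cons]
      simp

theorem pv_getLastD_append (t : List Char) (ch : Char) :
    (t ++ [ch]).getLastD ' ' = ch := by
  simp

theorem pv_step_inv (a : List (List Char) × List Char) (b : List Char × Option Char)
    (ch : Char) (h : pvInv a b) : pvInv (pvStepA a ch) (pvStepB b ch) := by
  obtain ⟨o, t⟩ := a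
  obtain ⟨p, pr⟩ := b
  obtain ⟨h1, h2⟩ := h
  dsimp only at h1 h2
  by_cases hs : pvIsSep ch = true
  · -- separator character
    by_cases ht : t = []
    · -- token empty: A unchanged, B appends nothing (pvPrevOk = false)
      subst ht
      obtain ⟨hp, hd⟩ := h1 rfl
      unfold pvStepA pvStepB
      rw [if_pos hs, if_pos hs, if_neg (by simp), if_neg (by simp [hp])]
      show pvInv (o, []) (p, some ch)
      unfold pvInv; dsimp only
      exact ⟨fun _ => ⟨by simp [pvPrevOk, hs], hd⟩, fun hc => absurd rfl hc⟩
    · -- token nonempty: A flushes, B appends a space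
      obtain ⟨hb1, hb2, hb3⟩ := h2 ht
      unfold pvStepA pvStepB
      rw [if_pos hs, if_pos hs, if_pos ht,
        if_pos (show pvPrevOk pr = true by
          rw [hb2]; show (!pvIsSep (t.getLastD ' ')) = true; rw [hb3]; rfl)]
      show pvInv (o ++ [t], []) (p ++ [' '], some ch)
      unfold pvInv; dsimp only
      exact ⟨fun _ => ⟨by simp [pvPrevOk, hs], Or.inr ⟨by simp, by rw [hb1]⟩⟩,
        fun hc => absurd rfl hc⟩
  · -- non-separator character
    by_cases ht : t = []
    · -- token empty: A starts the token at [ch], B appends ch (no boundary)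
      subst ht
      obtain ⟨hp, hd⟩ := h1 rfl
      have hbnd : pvBoundary pr ch = false := by
        cases pr with
        | none => rfl
        | some c =>
          have hc : pvIsSep c = true := by simpa [pvPrevOk] using hp
          simp [pvBoundary, hc]
      unfold pvStepA pvStepB
      rw [if_neg hs, if_neg (by simp), if_neg hs, if_neg (by simp [hbnd])]
      show pvInv (o, [ch]) (p ++ [ch], some ch)
      unfold pvInv; dsimp only
      refine ⟨fun hc => absurd hc (by simp), fun _ => ⟨?_, rfl, ?_⟩⟩
      · rcases hd with ⟨ho, hb⟩ | ⟨ho, hb⟩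
        · simp [ho, hb, PySem.Chars.join_singleton]
        · rw [hb, pv_join_append o [ch] ho]
          simp
      · simpa using Bool.eq_false_iff.mpr hs
    · -- token nonempty: A's break test and B's boundary test coincide
      obtain ⟨hb1, hb2, hb3⟩ := h2 ht
      by_cases hu : PySem.Chars.isupper ch = true ∧
          ¬ PySem.Chars.isupper (t.getLastD ' ') = true
      · -- word boundary: A flushes and restarts at ch, B appends a space and ch
        have hl : PySem.Chars.isupper (t.getLastD ' ') = false := Bool.eq_false_iff.mpr hu.2
        have hbnd : pvBoundary pr ch = true := by
          rw [hb2]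
          show (PySem.Chars.isupper ch && !pvIsSep (t.getLastD ' ') &&
            !PySem.Chars.isupper (t.getLastD ' ')) = true
          rw [hb3, hl, hu.1]; rfl
        unfold pvStepA pvStepB
        rw [if_neg hs, if_pos ⟨hu.1, ht, hu.2⟩, if_neg hs, if_pos hbnd]
        show pvInv (o ++ [t], [ch]) (p ++ [' ', ch], some ch)
        unfold pvInv; dsimp only
        refine ⟨fun hc => absurd hc (by simp), fun _ => ⟨?_, rfl, ?_⟩⟩
        · rw [hb1, pv_join_append (o ++ [t]) [ch] (by simp)]
        · simpa using Bool.eq_false_iff.mpr hs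
      · -- no boundary: both append ch to the current word
        have hbnd : pvBoundary pr ch = false := by
          rw [hb2]
          show (PySem.Chars.isupper ch && !pvIsSep (t.getLastD ' ') &&
            !PySem.Chars.isupper (t.getLastD ' ')) = false
          rcases Decidable.not_and_iff_not_or_not.mp hu with h' | h'
          · rw [Bool.eq_false_iff.mpr h']; rfl
          · have hl : PySem.Chars.isupper (t.getLastD ' ') = true := Decidable.not_not.mp h'
            rw [hl]; simp
        have hA : ¬ (PySem.Chars.isupper ch = true ∧ t ≠ [] ∧
            ¬ PySem.Chars.isupper (t.getLastD ' ') = true) := fun hc => hu ⟨hc.1, hc.2.2⟩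
        unfold pvStepA pvStepB
        rw [if_neg hs, if_neg hA, if_neg hs, if_neg (by simp [hbnd])]
        show pvInv (o, t ++ [ch]) (p ++ [ch], some ch)
        unfold pvInv; dsimp only
        refine ⟨fun hc => absurd hc (by simp [ht]), fun _ => ⟨?_, by rw [pv_getLastD_append], ?_⟩⟩
        · rcases List.eq_nil_or_concat o with ho | ⟨l, e, he⟩
          · rw [ho] at hb1 ⊢
            rw [hb1]
            simp [PySem.Chars.join_singleton]
          · have hne : o ≠ [] := by rw [he]; simp
            rw [hb1, pv_join_append o t hne, pv_join_append o (t ++ [ch]) hne]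
            simp
        · rw [pv_getLastD_append]
          exact Bool.eq_false_iff.mpr hs

theorem pv_fold_inv (l : List Char) (a : List (List Char) × List Char)
    (b : List Char × Option Char) (h : pvInv a b) :
    pvInv (l.foldl pvStepA a) (l.foldl pvStepB b) := by
  induction l generalizing a b with
  | nil => exact h
  | cons c t ih => exact ih _ _ (pv_step_inv a b c h)

theorem pv_rstrip_append_space (s : List Char) :
    PySem.Chars.rstrip (s ++ [' ']) = PySem.Chars.rstrip s := by
  simp [PySem.Chars.rstrip, PySem.Chars.isspace]

theorem pv_strip_append_space (s : List Char) :
    PySem.Chars.strip (s ++ [' ']) = PySem.Chars.strip s := by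
  simp only [PySem.Chars.strip, PySem.Chars.lstrip]
  rw [List.dropWhile_append]
  split
  · next hall =>
    have hls : List.dropWhile PySem.Chars.isspace s = [] := by simpa using hall
    simp [hls, PySem.Chars.rstrip, PySem.Chars.isspace]
  · exact pv_rstrip_append_space _

-- ===== VERDICT (by name: the statement is the Claim_ definition above) =====
theorem prettify_from_iri_spec : Claim_equal_prettify_from_iri := by
  intro iri _
  unfold Spec_prettify_from_iri prettify_from_iri prettify_from_iri_alt
  have htails : pvTailB iri.toList = pvTailA iri.toList := rfl
  by_cases hnil : iri.toList = []
  · simp [hnil, show pvTailA ([] : List Char) = [] from rfl]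
  · simp only [hnil, if_false, htails]
    by_cases htail : pvTailA iri.toList = []
    · simp [htail]
    · simp only [htail, if_neg, ne_eq, not_false_eq_true]
      have hinv : pvInv ((pvTailA iri.toList).foldl pvStepA ([], []))
          ((pvTailA iri.toList).foldl pvStepB ([], none)) := by
        apply pv_fold_inv
        exact ⟨fun _ => ⟨rfl, Or.inl ⟨rfl, rfl⟩⟩, fun hc => absurd rfl hc⟩
      set sa := (pvTailA iri.toList).foldl pvStepA ([], []) with hsa
      set sb := (pvTailA iri.toList).foldl pvStepB ([], none) with hsb
      obtain ⟨h1, h2⟩ := hinv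
      have hlab : PySem.Chars.strip (PySem.Chars.join [' ']
          (if sa.2 ≠ [] then sa.1 ++ [sa.2] else sa.1)) = PySem.Chars.strip sb.1 := by
        by_cases ht : sa.2 = []
        · obtain ⟨_, hd⟩ := h1 ht
          rcases hd with ⟨ho, hb⟩ | ⟨_, hb⟩
          · simp [ht, ho, hb, PySem.Chars.join_nil]
          · rw [hb, pv_strip_append_space]
            simp [ht]
        · obtain ⟨hb1, _, _⟩ := h2 ht
          rw [hb1]
          simp [ht]
      rw [hlab]
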